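-- pv_equiv track=rewrite | github.com/Foword5/AdventOfCode | 2024/1/main.py | calculate_similarity_score
-- ===== SOURCE A (Python) =====
-- def calculate_similarity_score(list1, list2):
--     sim = 0
--     for i in range(len(list1)):
--         small_sim = 0
--         for j in range(len(list2)):
--             if list1[i] == list2[j]:
--                 small_sim += 1
--         sim += int(list1[i]) * small_sim
--     return sim
-- ===== SOURCE B (Python) =====
-- def calculate_similarity_score(list1, list2):
--     # B: sort copies of both lists, then one two-pointer merge over the sorted
--     # sequences, handling each maximal run of equal values at once.
--     s1 = sorted(list1)
--     s2 = sorted(list2)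
--     sim = 0
--     i = 0
--     j = 0
--     while i < len(s1):
--         v = s1[i]
--         c1 = 0
--         while i < len(s1) and s1[i] == v:
--             c1 += 1
--             i += 1
--         while j < len(s2) and s2[j] < v:
--             j += 1
--         c2 = 0
--         while j < len(s2) and s2[j] == v:
--             c2 += 1
--             j += 1
--         sim += int(v) * c1 * c2
--     return sim
-- ===== Notes on version B (the rewrite author's own statement) =====
-- stated objective: faster
-- what changed: Replaces the nested per-element rescan of list2 by sorting both lists once and doing a single two-pointer merge that processes each maximal run of equal values with one multiplication.
import Mathlib
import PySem

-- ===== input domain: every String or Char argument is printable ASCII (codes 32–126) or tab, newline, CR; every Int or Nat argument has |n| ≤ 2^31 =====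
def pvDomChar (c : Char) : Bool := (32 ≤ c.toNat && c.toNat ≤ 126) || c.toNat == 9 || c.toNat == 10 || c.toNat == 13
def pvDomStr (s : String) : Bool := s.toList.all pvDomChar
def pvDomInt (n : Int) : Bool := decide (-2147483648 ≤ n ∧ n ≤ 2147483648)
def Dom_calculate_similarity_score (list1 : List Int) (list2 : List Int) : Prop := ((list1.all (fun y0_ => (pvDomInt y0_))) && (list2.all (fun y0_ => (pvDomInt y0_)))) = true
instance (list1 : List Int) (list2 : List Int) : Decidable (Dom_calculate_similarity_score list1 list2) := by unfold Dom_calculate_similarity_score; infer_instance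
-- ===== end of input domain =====

-- B sorts copies of both lists and does one two-pointer merge over runs of equal
-- values, replacing A's nested rescan of list2 (objective: faster).

-- ===== PORT A =====
def calculate_similarity_score (list1 : List Int) (list2 : List Int) : Int :=
  (PySem.List.pyRange 0 list1.length 1).foldl (fun sim i =>
    let small_sim : Int :=
      (PySem.List.pyRange 0 list2.length 1).foldl (fun s j =>
        if PySem.List.pyGetD list1 i 0 == PySem.List.pyGetD list2 j 0 then s + 1 else s) 0
    sim + PySem.List.pyGetD list1 i 0 * small_sim) 0

-- ===== PORT B =====
-- The outer while loop of Source B: the advancing indices i and j become the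
-- remaining suffixes t1 (of s1) and t2 (of s2); the three inner while loops are
-- the takeWhile/dropWhile scans over those suffixes.
def pvRunMerge (t1 t2 : List Int) : Int :=
  match h : t1 with
  | [] => 0
  | v :: _ =>
    let c1 : Int := (t1.takeWhile (fun x => x == v)).length
    let rest1 := t1.dropWhile (fun x => x == v)
    let t2' := t2.dropWhile (fun x => decide (x < v))
    let c2 : Int := (t2'.takeWhile (fun x => x == v)).length
    let rest2 := t2'.dropWhile (fun x => x == v)
    v * c1 * c2 + pvRunMerge rest1 rest2
termination_by t1.length
decreasing_by
  rw [h, List.dropWhile_cons_of_pos (by simp)]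
  exact Nat.lt_succ_of_le (List.length_dropWhile_le _ _)

def calculate_similarity_score_alt (list1 : List Int) (list2 : List Int) : Int :=
  pvRunMerge (PySem.List.sorted list1 (fun x => x) false)
             (PySem.List.sorted list2 (fun x => x) false)

-- ===== PRECONDITION & SPEC =====
def Spec_calculate_similarity_score (list1 : List Int) (list2 : List Int) (out : Int) : Prop := out = calculate_similarity_score_alt list1 list2
instance (list1 : List Int) (list2 : List Int) (out : Int) : Decidable (Spec_calculate_similarity_score list1 list2 out) := by unfold Spec_calculate_similarity_score; infer_instance

-- ===== CLAIM (what is proved, stated in full; the proofs are below) =====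
def Claim_equal_calculate_similarity_score : Prop := ∀ (list1 : List Int) (list2 : List Int), Dom_calculate_similarity_score list1 list2 → Spec_calculate_similarity_score list1 list2 (calculate_similarity_score list1 list2)

-- ===== LEMMAS AND PROOFS =====

-- Both programs compute Σ_{x ∈ l1} x * count(x, l2).
def pvS (l1 l2 : List Int) : Int := (l1.map (fun x => x * (l2.count x : Int))).sum

-- A's inner loop counts the occurrences of v in list2.
theorem inner_count (list2 : List Int) (v : Int) :
    (PySem.List.pyRange 0 list2.length 1).foldl (fun s j =>
      if v == PySem.List.pyGetD list2 j 0 then s + 1 else s) (0 : Int)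
      = (list2.count v : Int) := by
  rw [PySem.List.foldl_pyRange_zero_pyGetD' list2 0
        (fun s y => if v == y then s + 1 else s) 0]
  induction list2 using List.reverseRecOn with
  | nil => simp
  | append_singleton xs x ih =>
      rw [List.foldl_append, List.foldl_cons, List.foldl_nil, ih, List.count_append]
      by_cases h : v = x
      · simp [h]
      · simp [h, List.count_eq_zero.mpr (by simp [h] : v ∉ [x])]

theorem foldl_add_map (f : Int → Int) (l : List Int) (a : Int) :
    l.foldl (fun s x => s + f x) a = a + (l.map f).sum := by
  induction l generalizing a with
  | nil => simp
  | cons x t ih => simp [ih, add_assoc]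

theorem A_eq_pvS (l1 l2 : List Int) : calculate_similarity_score l1 l2 = pvS l1 l2 := by
  unfold calculate_similarity_score pvS
  rw [PySem.List.foldl_pyRange_zero_pyGetD' l1 0
        (fun sim x => sim + x *
          ((PySem.List.pyRange 0 l2.length 1).foldl (fun s j =>
            if x == PySem.List.pyGetD l2 j 0 then s + 1 else s) 0)) 0]
  have : ∀ a : Int, l1.foldl (fun sim x => sim + x *
          ((PySem.List.pyRange 0 l2.length 1).foldl (fun s j =>
            if x == PySem.List.pyGetD l2 j 0 then s + 1 else s) 0)) a
        = l1.foldl (fun sim x => sim + x * (l2.count x : Int)) a := by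
    intro a
    apply PySem.List.foldl_congr_mem
    intro acc x _
    rw [inner_count]
  rw [this 0, foldl_add_map]
  simp

-- On a sorted list, everything after the leading run of v is > v (given all ≥ v).
theorem dropWhile_eq_gt (v : Int) (l : List Int) (hs : l.Pairwise (· ≤ ·))
    (hge : ∀ x ∈ l, v ≤ x) :
    ∀ x ∈ l.dropWhile (fun x => x == v), v < x := by
  induction l with
  | nil => simp
  | cons a t ih =>
      by_cases h : a = v
      · subst h
        rw [List.dropWhile_cons_of_pos (by simp)]
        exact ih hs.tail (fun x hx => hge x (List.mem_cons_of_mem _ hx))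
      · rw [List.dropWhile_cons_of_neg (by simp [h])]
        intro x hx
        rcases List.mem_cons.mp hx with rfl | hx
        · exact lt_of_le_of_ne (hge x (List.mem_cons_self)) (fun e => h e.symm)
        · exact lt_of_lt_of_le
            (lt_of_le_of_ne (hge a (List.mem_cons_self)) (fun e => h e.symm))
            (List.rel_of_pairwise_cons hs hx)

-- After dropping the elements < v of a sorted list, everything is ≥ v.
theorem dropWhile_lt_ge (v : Int) (l : List Int) (hs : l.Pairwise (· ≤ ·)) :
    ∀ x ∈ l.dropWhile (fun x => decide (x < v)), v ≤ x := by
  induction l with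
  | nil => simp
  | cons a t ih =>
      by_cases h : a < v
      · rw [List.dropWhile_cons_of_pos (by simpa using h)]
        exact ih hs.tail
      · rw [List.dropWhile_cons_of_neg (by simpa using h)]
        intro x hx
        rcases List.mem_cons.mp hx with rfl | hx
        · exact le_of_not_gt h
        · exact le_trans (le_of_not_gt h) (List.rel_of_pairwise_cons hs hx)

theorem count_eq_zero_of_forall_ne {v : Int} {l : List Int}
    (h : ∀ x ∈ l, x ≠ v) : l.count v = 0 :=
  List.count_eq_zero.mpr (fun hv => (h v hv) rfl)

-- map-sum over a run of equal elements
theorem sum_map_run (f : Int → Int) (l : List Int) (v : Int)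
    (h : ∀ x ∈ l, x = v) : (l.map f).sum = (l.length : Int) * f v := by
  induction l with
  | nil => simp
  | cons a t ih =>
      have ha : a = v := h a List.mem_cons_self
      rw [List.map_cons, List.sum_cons, ih (fun x hx => h x (List.mem_cons_of_mem _ hx)), ha]
      simp [List.length_cons]; ring

-- The merge computes pvS on sorted inputs.
theorem runMerge_eq_pvS (t1 t2 : List Int)
    (h1 : t1.Pairwise (· ≤ ·)) (h2 : t2.Pairwise (· ≤ ·)) :
    pvRunMerge t1 t2 = pvS t1 t2 := by
  revert h1 h2
  induction t1, t2 using pvRunMerge.induct with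
  | case1 t2 => intro _ _; rw [pvRunMerge]; simp [pvS]
  | case2 t2 v tl t2d r2d r1d ih =>
    intro h1 h2
    rw [pvRunMerge]
    set p : Int → Bool := fun x => x == v with hp
    set run1 := (v :: tl).takeWhile p with hrun1
    set rest1 := (v :: tl).dropWhile p with hrest1
    set t2' := t2.dropWhile (fun x => decide (x < v)) with ht2'
    set run2 := t2'.takeWhile p with hrun2
    set rest2 := t2'.dropWhile p with hrest2
    -- basic order facts
    have hge1 : ∀ x ∈ v :: tl, v ≤ x := by
      intro x hx
      rcases List.mem_cons.mp hx with rfl | hx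
      · exact le_refl x
      · exact List.rel_of_pairwise_cons h1 hx
    have hgt1 : ∀ x ∈ rest1, v < x := dropWhile_eq_gt v _ h1 hge1
    have hge2 : ∀ x ∈ t2', v ≤ x := dropWhile_lt_ge v t2 h2
    have h2' : t2'.Pairwise (· ≤ ·) := List.Pairwise.sublist (List.dropWhile_sublist _) h2
    have hgt2 : ∀ x ∈ rest2, v < x := dropWhile_eq_gt v t2' h2' hge2
    have hrun1v : ∀ x ∈ run1, x = v := fun x hx => by
      have := List.mem_takeWhile_imp hx; simpa [hp] using this
    have hrun2v : ∀ x ∈ run2, x = v := fun x hx => by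
      have := List.mem_takeWhile_imp hx; simpa [hp] using this
    have h1' : rest1.Pairwise (· ≤ ·) := List.Pairwise.sublist (List.dropWhile_sublist _) h1
    have h2'' : rest2.Pairwise (· ≤ ·) := List.Pairwise.sublist (List.dropWhile_sublist _) h2'
    -- splits
    have hsplit1 : run1 ++ rest1 = v :: tl := List.takeWhile_append_dropWhile
    have hsplit2 : t2.takeWhile (fun x => decide (x < v)) ++ t2' = t2 :=
      List.takeWhile_append_dropWhile
    have hsplit2' : run2 ++ rest2 = t2' := List.takeWhile_append_dropWhile
    -- count v t2 = run2.length
    have hcv : t2.count v = run2.length := by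
      rw [← hsplit2, List.count_append, ← hsplit2', List.count_append]
      have hz1 : (t2.takeWhile (fun x => decide (x < v))).count v = 0 :=
        count_eq_zero_of_forall_ne (fun x hx => by
          have := List.mem_takeWhile_imp hx
          exact ne_of_lt (by simpa using this))
      have hz2 : rest2.count v = 0 :=
        count_eq_zero_of_forall_ne (fun x hx => ne_of_gt (hgt2 x hx))
      have hz3 : run2.count v = run2.length := by
        rw [List.count_eq_length]
        intro b hb
        have := hrun2v b hb
        simp [this]
      omega
    -- counts of elements of rest1 are unaffected by dropping ≤ v elements of t2
    have hcx : ∀ x ∈ rest1, t2.count x = rest2.count x := by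
      intro x hx
      have hvx : v < x := hgt1 x hx
      rw [← hsplit2, List.count_append, ← hsplit2', List.count_append]
      have hz1 : (t2.takeWhile (fun x => decide (x < v))).count x = 0 :=
        count_eq_zero_of_forall_ne (fun y hy => by
          have := List.mem_takeWhile_imp hy
          exact ne_of_lt (lt_trans (by simpa using this) hvx))
      have hz2 : run2.count x = 0 :=
        count_eq_zero_of_forall_ne (fun y hy => by
          rw [hrun2v y hy]; exact ne_of_lt hvx)
      omega
    -- assemble
    have hIH : pvRunMerge rest1 rest2 = pvS rest1 rest2 := ih h1' h2''
    rw [hIH]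
    unfold pvS
    rw [← hsplit1, List.map_append, List.sum_append]
    have e1 : (run1.map (fun x => x * (t2.count x : Int))).sum
        = (run1.length : Int) * (v * (run2.length : Int)) := by
      rw [sum_map_run _ _ v hrun1v, hcv]
    have e2 : (rest1.map (fun x => x * (t2.count x : Int))).sum
        = (rest1.map (fun x => x * (rest2.count x : Int))).sum := by
      apply congrArg
      apply List.map_congr_left
      intro x hx
      rw [hcx x hx]
    rw [e1, e2]
    ring

theorem B_eq_pvS (l1 l2 : List Int) : calculate_similarity_score_alt l1 l2 = pvS l1 l2 := by
  unfold calculate_similarity_score_alt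
  have p1 := PySem.List.sorted_perm l1 (fun x : Int => x) false
  have p2 := PySem.List.sorted_perm l2 (fun x : Int => x) false
  rw [runMerge_eq_pvS _ _ (by simpa using PySem.List.sorted_pairwise l1 (fun x : Int => x))
        (by simpa using PySem.List.sorted_pairwise l2 (fun x : Int => x))]
  unfold pvS
  have hcount : ∀ x : Int,
      ((PySem.List.sorted l2 (fun x => x) false).count x : Int) = (l2.count x : Int) := by
    intro x; exact congrArg _ (p2.count_eq x)
  calc ((PySem.List.sorted l1 (fun x => x) false).map
          (fun x => x * ((PySem.List.sorted l2 (fun x => x) false).count x : Int))).sum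
      = ((PySem.List.sorted l1 (fun x => x) false).map
          (fun x => x * (l2.count x : Int))).sum := by
        apply congrArg; apply List.map_congr_left; intro x _; rw [hcount]
    _ = (l1.map (fun x => x * (l2.count x : Int))).sum :=
        (p1.map _).sum_eq

-- ===== VERDICT (by name: the statement is the Claim_ definition above) =====
theorem calculate_similarity_score_spec : Claim_equal_calculate_similarity_score := by
  intro l1 l2 _
  unfold Spec_calculate_similarity_score
  rw [A_eq_pvS, B_eq_pvS]
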